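-- pv_equiv track=rewrite | github.com/tomojitakasu/PocketSDR | test/sdr_code_test.py | code_oct
-- ===== SOURCE A (Python) =====
-- def code_oct(code):
--     str = ''
--     oct = 0
--     for i in range(len(code)):
--         oct = (oct << 1) + (1 if code[i] == 1 else 0)
--         if i % 3 == 2:
--             str += '%1d' % (oct)
--             oct = 0
--     return str
-- ===== SOURCE B (Python) =====
-- def code_oct(code):
--     it = iter(code)
--     digits = []
--     for a, b, c in zip(it, it, it):  # complete 3-bit groups; trailing 1-2 bits are dropped
--         digits.append(str(4 * (a == 1) + 2 * (b == 1) + (c == 1)))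
--     return ''.join(digits)
-- ===== Notes on version B (the rewrite author's own statement) =====
-- stated objective: simpler
-- what changed: Replaces the index loop with a shift-and-reset accumulator and a mod-3 flush by direct grouping into 3-bit triples (zip of one iterator) whose octal digit is computed arithmetically and joined.
import Mathlib
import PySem

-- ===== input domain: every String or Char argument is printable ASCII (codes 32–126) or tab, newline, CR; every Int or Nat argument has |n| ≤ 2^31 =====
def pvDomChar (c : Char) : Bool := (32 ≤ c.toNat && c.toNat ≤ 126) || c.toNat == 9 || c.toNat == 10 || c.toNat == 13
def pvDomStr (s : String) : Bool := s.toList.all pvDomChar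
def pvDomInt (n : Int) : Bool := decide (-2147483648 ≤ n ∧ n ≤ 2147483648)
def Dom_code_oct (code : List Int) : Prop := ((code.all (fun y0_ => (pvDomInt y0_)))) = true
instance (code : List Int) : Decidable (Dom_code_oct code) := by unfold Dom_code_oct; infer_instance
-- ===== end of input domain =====

-- B replaces A's shift accumulator + mod-3 flush with direct grouping into 3-bit triples
-- whose octal digit is computed arithmetically and joined (objective: simpler).


-- ===== PORT A =====
-- 'oct << 1' is 'oct * 2'; code[i] with i always in 0..len-1, so pyGetD is exact here.
def code_oct (code : List Int) : String :=
  ((PySem.List.pyRange 0 (code.length : Int) 1).foldl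
    (fun (st : String × Int) i =>
      let o := st.2 * 2 + (if PySem.List.pyGetD code i 0 = 1 then 1 else 0)
      if PySem.Int.mod i 3 = 2 then (st.1 ++ PySem.Int.toStr o, 0) else (st.1, o))
    ("", 0)).1

-- ===== PORT B =====
-- 'for a, b, c in zip(it, it, it)' consumes complete triples, dropping 1-2 trailing bits.
def codeOctDigits : List Int → List String
  | a :: b :: c :: rest =>
      PySem.Int.toStr (4 * (if a = 1 then 1 else 0) + 2 * (if b = 1 then 1 else 0)
        + (if c = 1 then 1 else 0)) :: codeOctDigits rest
  | _ => []

def code_oct_alt (code : List Int) : String := String.join (codeOctDigits code)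

-- ===== PRECONDITION & SPEC =====
def Spec_code_oct (code : List Int) (out : String) : Prop := out = code_oct_alt code
instance (code : List Int) (out : String) : Decidable (Spec_code_oct code out) := by unfold Spec_code_oct; infer_instance

-- ===== CLAIM (what is proved, stated in full; the proofs are below) =====
def Claim_equal_code_oct : Prop := ∀ (code : List Int), Dom_code_oct code → Spec_code_oct code (code_oct code)

-- ===== LEMMAS AND PROOFS =====

-- A's loop step over an enumerated element (index, bit)
def codeOctStep (st : String × Int) (p : Int × Int) : String × Int :=
  let o := st.2 * 2 + (if p.2 = 1 then 1 else 0)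
  if PySem.Int.mod p.1 3 = 2 then (st.1 ++ PySem.Int.toStr o, 0) else (st.1, o)

lemma join_cons (d : String) (ds : List String) :
    String.join (d :: ds) = d ++ String.join ds := by
  simp [String.join_eq]

lemma mod3_emod (i : Int) : PySem.Int.mod i 3 = i % 3 :=
  PySem.Int.mod_eq_emod_of_pos (by norm_num)

lemma codeOct_main (code : List Int) : ∀ (k : Nat) (acc : String),
    ((PySem.List.enumerate code (3 * (k : Int))).foldl codeOctStep (acc, 0)).1
      = acc ++ String.join (codeOctDigits code) := by
  induction code using codeOctDigits.induct with
  | case1 a b c rest ih =>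
      intro k acc
      simp only [PySem.List.enumerate_cons, List.foldl_cons, codeOctStep, mod3_emod]
      rw [if_pos (by omega), if_neg (by omega), if_neg (by omega)]
      dsimp only
      have h3 : 3 * (k : Int) + 1 + 1 + 1 = 3 * ((k + 1 : Nat) : Int) := by push_cast; ring
      rw [h3, ih (k + 1)]
      simp only [codeOctDigits]
      rw [show (((0 : Int) * 2 + (if a = 1 then 1 else 0)) * 2
            + (if b = 1 then (1:Int) else 0)) * 2 + (if c = 1 then 1 else 0)
          = 4 * (if a = 1 then 1 else 0) + 2 * (if b = 1 then 1 else 0)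
            + (if c = 1 then 1 else 0) by ring]
      rw [join_cons, String.append_assoc]
  | case2 code h =>
      intro k acc
      match code, h with
      | [], _ => simp [codeOctDigits, String.join]
      | [a], _ =>
          simp only [PySem.List.enumerate_cons, PySem.List.enumerate_nil, List.foldl_cons,
            List.foldl_nil, codeOctStep, mod3_emod]
          rw [if_neg (by omega)]
          simp [codeOctDigits, String.join]
      | [a, b], _ =>
          simp only [PySem.List.enumerate_cons, PySem.List.enumerate_nil, List.foldl_cons,
            List.foldl_nil, codeOctStep, mod3_emod]
          rw [if_neg (by omega), if_neg (by omega)]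
          simp [codeOctDigits, String.join]
      | a :: b :: c :: r, h => exact absurd rfl (h a b c r)

-- ===== VERDICT (by name: the statement is the Claim_ definition above) =====
theorem code_oct_spec : Claim_equal_code_oct := by
  intro code _
  unfold Spec_code_oct code_oct code_oct_alt
  have he : PySem.List.enumerate code 0
      = (PySem.List.pyRange 0 (code.length : Int) 1).map
          (fun j => (j, PySem.List.pyGetD code j 0)) :=
    PySem.List.enumerate_eq_map_pyRange code 0
  have hfold : (PySem.List.pyRange 0 (code.length : Int) 1).foldl
      (fun (st : String × Int) i =>
        let o := st.2 * 2 + (if PySem.List.pyGetD code i 0 = 1 then 1 else 0)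
        if PySem.Int.mod i 3 = 2 then (st.1 ++ PySem.Int.toStr o, 0) else (st.1, o))
      ("", 0)
      = (PySem.List.enumerate code 0).foldl codeOctStep ("", 0) := by
    rw [he, List.foldl_map]
    rfl
  rw [hfold]
  have := codeOct_main code 0 ""
  simpa using this
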